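-- pv_equiv track=rewrite | github.com/ottoesp/logicgatediagramgenerator | diagramapp/diagramGenerator/render.py | determine_dimensions
-- ===== SOURCE A (Python) =====
-- NODE_SPACING = 3
--
-- LINE_SPACING = 2
--
-- EDGE_SPACING = 2
--
-- def determine_dimensions(layers, x_spacing):
--     max_x = (max([layer[-1][1] for layer in layers]) + 2) * x_spacing
--
--     y_vals = [0 for _ in layers]
--
--     y_offset = 0
--
--     for i, layer in enumerate(layers):
--         y_vals[i] = y_offset
--         y_offset += NODE_SPACING + len(layer) * LINE_SPACING + 2 * EDGE_SPACING
--     max_y = y_offset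
--
--     return max_x, max_y, y_vals
-- ===== SOURCE B (Python) =====
-- NODE_SPACING = 3
--
-- LINE_SPACING = 2
--
-- EDGE_SPACING = 2
--
--
-- def determine_dimensions(layers, x_spacing):
--     max_x = (max([layer[-1][1] for layer in layers]) + 2) * x_spacing
--     max_y, y_vals = _stack(layers)
--     return max_x, max_y, y_vals
--
--
-- def _stack(layers):
--     # Recursively stack the tail's layout below the head layer: the tail's
--     # offsets are shifted down by the head layer's height.
--     if not layers:
--         return 0, []
--     inc = NODE_SPACING + len(layers[0]) * LINE_SPACING + 2 * EDGE_SPACING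
--     total, tail_vals = _stack(layers[1:])
--     return inc + total, [0] + [v + inc for v in tail_vals]
-- ===== Notes on version B (the rewrite author's own statement) =====
-- stated objective: alternative
-- what changed: Replaces A's forward accumulator loop (write y_vals[i], add increment) with a structural recursion on the layer list that lays out the tail first and then shifts every tail offset down by the head layer's height, building the offsets back-to-front.
import Mathlib
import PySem

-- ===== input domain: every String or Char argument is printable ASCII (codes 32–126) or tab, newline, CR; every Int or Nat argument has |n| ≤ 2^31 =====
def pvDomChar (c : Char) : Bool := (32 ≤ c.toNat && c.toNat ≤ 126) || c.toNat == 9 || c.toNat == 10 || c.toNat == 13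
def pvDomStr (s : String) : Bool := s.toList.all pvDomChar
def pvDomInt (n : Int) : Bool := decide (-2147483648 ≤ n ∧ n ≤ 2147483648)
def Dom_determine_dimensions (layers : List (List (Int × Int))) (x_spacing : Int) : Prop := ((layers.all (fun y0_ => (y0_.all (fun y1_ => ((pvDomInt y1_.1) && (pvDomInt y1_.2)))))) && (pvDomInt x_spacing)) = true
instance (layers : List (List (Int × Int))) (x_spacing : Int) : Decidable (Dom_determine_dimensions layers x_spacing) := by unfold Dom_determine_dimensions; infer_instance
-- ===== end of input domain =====

-- B replaces A's forward accumulator loop with a structural recursion that lays out the tail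
-- first and shifts its offsets by the head layer's height; objective: alternative decomposition.


-- ===== PORT A =====
-- max_x = (max([layer[-1][1] for layer in layers]) + 2) * x_spacing; then the fused loop
-- appending y_offset for each layer (A writes into preallocated y_vals by index; appending
-- in enumeration order yields the same list) while incrementing y_offset; max_y = final y_offset.
def determine_dimensions (layers : List (List (Int × Int))) (x_spacing : Int) : Int × Int × List Int :=
  let lasts := layers.map (fun layer => (PySem.List.pyGetD layer (-1) (0, 0)).2)
  let max_x := ((PySem.List.max? lasts (fun y => y)).getD 0 + 2) * x_spacing
  let r := layers.foldl
    (fun (s : Int × List Int) (layer : List (Int × Int)) =>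
      (s.1 + (3 + (layer.length : Int) * 2 + 2 * 2), s.2 ++ [s.1]))
    (0, [])
  (max_x, r.1, r.2)

-- ===== PORT B =====
-- _stack: recursion on the layer list; tail laid out first, its offsets shifted by the head's height.
def ddStack : List (List (Int × Int)) → Int × List Int
  | [] => (0, [])
  | layer :: rest =>
    let inc : Int := 3 + (layer.length : Int) * 2 + 2 * 2
    let t := ddStack rest
    (inc + t.1, 0 :: t.2.map (fun v => v + inc))

def determine_dimensions_alt (layers : List (List (Int × Int))) (x_spacing : Int) : Int × Int × List Int :=
  let lasts := layers.map (fun layer => (PySem.List.pyGetD layer (-1) (0, 0)).2)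
  let max_x := ((PySem.List.max? lasts (fun y => y)).getD 0 + 2) * x_spacing
  let r := ddStack layers
  (max_x, r.1, r.2)

-- ===== PRECONDITION & SPEC =====
-- Pre_ excludes exactly the inputs on which Python A raises: empty layers (ValueError from
-- max of an empty list) and any empty layer (IndexError from layer[-1]).
def Pre_determine_dimensions (layers : List (List (Int × Int))) (x_spacing : Int) : Prop :=
  layers ≠ [] ∧ ∀ layer ∈ layers, layer ≠ []
instance (layers : List (List (Int × Int))) (x_spacing : Int) : Decidable (Pre_determine_dimensions layers x_spacing) := by unfold Pre_determine_dimensions; infer_instance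
def pvWitness_determine_dimensions : (List (List (Int × Int))) × Int := ([[(0, 1)], [(2, 3), (4, 5)]], 2)

def Spec_determine_dimensions (layers : List (List (Int × Int))) (x_spacing : Int) (out : Int × Int × List Int) : Prop := out = determine_dimensions_alt layers x_spacing
instance (layers : List (List (Int × Int))) (x_spacing : Int) (out : Int × Int × List Int) : Decidable (Spec_determine_dimensions layers x_spacing out) := by unfold Spec_determine_dimensions; infer_instance

-- ===== CLAIM (what is proved, stated in full; the proofs are below) =====
def Claim_equal_determine_dimensions : Prop := ∀ (layers : List (List (Int × Int))) (x_spacing : Int), Dom_determine_dimensions layers x_spacing → Pre_determine_dimensions layers x_spacing → Spec_determine_dimensions layers x_spacing (determine_dimensions layers x_spacing)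

-- ===== LEMMAS AND PROOFS =====

-- A's fused fold from state (off, p) equals off + B's recursive total, with B's offsets
-- shifted by off and appended after p.
theorem dd_fold_eq_stack (layers : List (List (Int × Int))) (off : Int) (p : List Int) :
    layers.foldl
      (fun (s : Int × List Int) (layer : List (Int × Int)) =>
        (s.1 + (3 + (layer.length : Int) * 2 + 2 * 2), s.2 ++ [s.1])) (off, p)
    = (off + (ddStack layers).1, p ++ (ddStack layers).2.map (fun v => v + off)) := by
  induction layers generalizing off p with
  | nil => simp [ddStack]
  | cons layer rest ih =>
    simp only [List.foldl_cons, ddStack]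
    rw [ih]
    simp only [Prod.mk.injEq, List.map_cons, List.map_map, Function.comp_def, zero_add,
      List.append_assoc, List.singleton_append]
    refine ⟨by ring, ?_⟩
    have hf : (fun v : Int => v + (off + (3 + (layer.length : Int) * 2 + 2 * 2)))
        = (fun v : Int => v + (3 + (layer.length : Int) * 2 + 2 * 2) + off) := by
      funext v; ring
    rw [hf]

-- ===== VERDICT (by name: the statement is the Claim_ definition above) =====
theorem determine_dimensions_spec : Claim_equal_determine_dimensions := by
  intro layers x_spacing _ _
  unfold Spec_determine_dimensions determine_dimensions determine_dimensions_alt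
  simp only
  rw [dd_fold_eq_stack]
  simp
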